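-- pv_equiv track=rewrite | github.com/AICPS/sg-collision-prediction | baseline_risk_assessment/dpm_trainer.py | balance_dataset
-- ===== SOURCE A (Python) =====
-- def balance_dataset(dataset):
--     # binary classes
--     seq_label = lambda x: x[1][0]
--     risk = [seq_label(sequence) for sequence in dataset if seq_label(sequence) == 1].count(1)
--     non_risk = len(dataset) - risk
--     min_number = min(risk, non_risk)
--     risk = min_number
--     non_risk = min_number
--
--     balanced = []
--     for sequence in dataset:
--         label = seq_label(sequence)
--         if label == 1 and risk > 0:
--             risk -= 1
--             balanced.append(sequence)
--         if label == 0 and non_risk > 0: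
--             non_risk -= 1
--             balanced.append(sequence)
--         if risk == 0 and non_risk == 0:
--             break
--
--     return balanced
-- ===== SOURCE B (Python) =====
-- def balance_dataset(dataset):
--     risk = sum(1 for s in dataset if s[1][0] == 1)
--     m = min(risk, len(dataset) - risk)
--     risk_idx = [i for i, s in enumerate(dataset) if s[1][0] == 1][:m]
--     non_idx = [i for i, s in enumerate(dataset) if s[1][0] == 0][:m]
--     return [dataset[i] for i in sorted(risk_idx + non_idx)]
-- ===== Notes on version B (the rewrite author's own statement) =====
-- stated objective: alternative
-- what changed: Replaced A's single pass with mutable down-counting budgets and an early break by an index-table decomposition: count risky labels, take the first m indices of each class, and gather the rows at the sorted merged indices.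
import Mathlib
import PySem

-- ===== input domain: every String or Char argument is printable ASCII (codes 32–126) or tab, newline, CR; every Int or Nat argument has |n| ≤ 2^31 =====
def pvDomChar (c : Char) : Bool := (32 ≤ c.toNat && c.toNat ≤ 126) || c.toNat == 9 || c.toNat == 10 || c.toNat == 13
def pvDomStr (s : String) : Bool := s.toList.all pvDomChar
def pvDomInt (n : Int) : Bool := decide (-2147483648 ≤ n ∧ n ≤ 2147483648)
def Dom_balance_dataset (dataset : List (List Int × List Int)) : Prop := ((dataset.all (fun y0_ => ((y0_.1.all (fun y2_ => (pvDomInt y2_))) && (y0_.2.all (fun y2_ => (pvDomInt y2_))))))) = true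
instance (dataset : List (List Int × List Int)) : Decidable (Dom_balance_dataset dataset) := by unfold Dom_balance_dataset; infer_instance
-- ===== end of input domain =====

-- B replaces A's down-counting-budget loop with early break by an index-table-then-gather
-- decomposition (first m indices of each class, rows gathered in sorted index order); objective: alternative.

-- ===== PORT A =====
-- seq_label = lambda x: x[1][0]  (exact on Pre_: label lists nonempty; Python raises IndexError otherwise)
def pvLabelA (s : List Int × List Int) : Int := (PySem.List.pyGet? s.2 0).getD 0

-- the 'for sequence in dataset: … break' loop, state (risk, non_risk, balanced)
def pvLoopA : List (List Int × List Int) → Int → Int → List (List Int × List Int) → List (List Int × List Int)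
  | [], _, _, balanced => balanced
  | s :: rest, risk, non_risk, balanced =>
    let label := pvLabelA s
    let st1 := if label = 1 ∧ risk > 0 then (risk - 1, balanced ++ [s]) else (risk, balanced)
    let st2 := if label = 0 ∧ non_risk > 0 then (non_risk - 1, st1.2 ++ [s]) else (non_risk, st1.2)
    if st1.1 = 0 ∧ st2.1 = 0 then st2.2 else pvLoopA rest st1.1 st2.1 st2.2

def balance_dataset (dataset : List (List Int × List Int)) : List (List Int × List Int) :=
  let risk : Int := (List.count 1 ((dataset.filter (fun s => pvLabelA s == 1)).map pvLabelA) : Nat)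
  let non_risk : Int := (dataset.length : Int) - risk
  let min_number := min risk non_risk
  pvLoopA dataset min_number min_number []

-- ===== PORT B =====
-- B reads the same s[1][0] label; it shares the accessor pvLabelA
def balance_dataset_alt (dataset : List (List Int × List Int)) : List (List Int × List Int) :=
  let risk : Int := (dataset.countP (fun s => pvLabelA s == 1) : Nat)
  let m : Int := min risk ((dataset.length : Int) - risk)
  let risk_idx := PySem.List.slice ((dataset.zipIdx.filter (fun p => pvLabelA p.1 == 1)).map Prod.snd) none (some m)
  let non_idx := PySem.List.slice ((dataset.zipIdx.filter (fun p => pvLabelA p.1 == 0)).map Prod.snd) none (some m)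
  (PySem.List.sorted (risk_idx ++ non_idx) (fun i => i)).filterMap (fun i => dataset[i]?)

-- ===== PRECONDITION & SPEC =====
-- Pre_ excludes datasets containing a sequence with an empty label list, on which A's s[1][0] raises IndexError.
def Pre_balance_dataset (dataset : List (List Int × List Int)) : Prop :=
  ∀ s ∈ dataset, s.2 ≠ []
instance (dataset : List (List Int × List Int)) : Decidable (Pre_balance_dataset dataset) := by
  unfold Pre_balance_dataset; infer_instance

def pvWitness_balance_dataset : (List (List Int × List Int)) :=
  [([5], [1]), ([3], [0]), ([2], [1])]

def Spec_balance_dataset (dataset : List (List Int × List Int)) (out : List (List Int × List Int)) : Prop := out = balance_dataset_alt dataset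
instance (dataset : List (List Int × List Int)) (out : List (List Int × List Int)) : Decidable (Spec_balance_dataset dataset out) := by unfold Spec_balance_dataset; infer_instance

-- ===== CLAIM (what is proved, stated in full; the proofs are below) =====
def Claim_equal_balance_dataset : Prop := ∀ (dataset : List (List Int × List Int)), Dom_balance_dataset dataset → Pre_balance_dataset dataset → Spec_balance_dataset dataset (balance_dataset dataset)

-- ===== LEMMAS AND PROOFS =====

-- canonical form: keep the first r label-1 rows and the first n label-0 rows, in order
def pvKeep : List (List Int × List Int) → Nat → Nat → List (List Int × List Int)
  | [], _, _ => []
  | s :: rest, r, n =>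
    if pvLabelA s = 1 then
      match r with
      | 0 => pvKeep rest 0 n
      | r' + 1 => s :: pvKeep rest r' n
    else if pvLabelA s = 0 then
      match n with
      | 0 => pvKeep rest r 0
      | n' + 1 => s :: pvKeep rest r n'
    else pvKeep rest r n

theorem pvKeep_zero (l : List (List Int × List Int)) : pvKeep l 0 0 = [] := by
  induction l with
  | nil => rfl
  | cons s rest ih => unfold pvKeep; split_ifs <;> simpa using ih

-- ----- A side: the loop is the canonical filter -----
theorem pvLoopA_eq_keep (l : List (List Int × List Int)) :
    ∀ (r n : Int) (bal : List (List Int × List Int)), 0 ≤ r → 0 ≤ n →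
      pvLoopA l r n bal = bal ++ pvKeep l r.toNat n.toNat := by
  induction l with
  | nil => intro r n bal hr hn; simp [pvLoopA, pvKeep]
  | cons s rest ih =>
    intro r n bal hr hn
    simp only [pvLoopA]
    split_ifs with c1 c2 c3 c3 c2 c3 c3
    · omega
    · omega
    · have h1 := c1.1
      rw [pvKeep.eq_def, show r.toNat = 1 by omega, show n.toNat = 0 by omega]
      simp [h1, pvKeep_zero]
    · have hk : pvKeep (s :: rest) r.toNat n.toNat = s :: pvKeep rest (r - 1).toNat n.toNat := by
        rw [pvKeep.eq_def, show r.toNat = (r - 1).toNat + 1 by omega]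
        simp [c1.1]
      rw [ih (r - 1) n (bal ++ [s]) (by omega) hn, hk]
      simp
    · have h0 := c2.1
      rw [pvKeep.eq_def, show r.toNat = 0 by omega, show n.toNat = 1 by omega]
      have hne : ¬ pvLabelA s = 1 := by rw [h0]; omega
      simp [h0, pvKeep_zero]
    · have h0 := c2.1
      have hne : ¬ pvLabelA s = 1 := by rw [h0]; omega
      have hk : pvKeep (s :: rest) r.toNat n.toNat = s :: pvKeep rest r.toNat (n - 1).toNat := by
        rw [pvKeep.eq_def, show n.toNat = (n - 1).toNat + 1 by omega]
        simp [h0]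
      rw [ih r (n - 1) (bal ++ [s]) hr (by omega), hk]
      simp
    · rw [show r.toNat = 0 by omega, show n.toNat = 0 by omega, pvKeep_zero]
      simp
    · rw [ih r n bal hr hn]
      congr 1
      by_cases hl1 : pvLabelA s = 1
      · have h00 : r.toNat = 0 := by
          have : ¬ r > 0 := fun h => c1 ⟨hl1, h⟩
          omega
        rw [h00]
        conv_rhs => rw [pvKeep.eq_def]
        simp [hl1]
      · by_cases hl0 : pvLabelA s = 0
        · have h00 : n.toNat = 0 := by
            have : ¬ n > 0 := fun h => c2 ⟨hl0, h⟩
            omega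
          rw [h00]
          conv_rhs => rw [pvKeep.eq_def]
          simp [hl0]
        · conv_rhs => rw [pvKeep.eq_def]
          simp [hl1, hl0]

-- ----- B side -----
def pvIdx1 (l : List (List Int × List Int)) : List Nat :=
  (l.zipIdx.filter (fun p => pvLabelA p.1 == 1)).map Prod.snd

def pvIdx0 (l : List (List Int × List Int)) : List Nat :=
  (l.zipIdx.filter (fun p => pvLabelA p.1 == 0)).map Prod.snd

def pvGather (l : List (List Int × List Int)) (r n : Nat) : List (List Int × List Int) :=
  (PySem.List.sorted ((pvIdx1 l).take r ++ (pvIdx0 l).take n) (fun i => i)).filterMap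
    (fun i => l[i]?)

theorem pvIdx1_cons (s : List Int × List Int) (l : List (List Int × List Int)) :
    pvIdx1 (s :: l) =
      if pvLabelA s = 1 then 0 :: (pvIdx1 l).map (· + 1) else (pvIdx1 l).map (· + 1) := by
  unfold pvIdx1
  rw [List.zipIdx_cons, List.zipIdx_succ, List.filter_cons, List.filter_map]
  simp only [List.map_map, Function.comp_def]
  split_ifs with h h' h' <;> simp_all

theorem pvIdx0_cons (s : List Int × List Int) (l : List (List Int × List Int)) :
    pvIdx0 (s :: l) =
      if pvLabelA s = 0 then 0 :: (pvIdx0 l).map (· + 1) else (pvIdx0 l).map (· + 1) := by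
  unfold pvIdx0
  rw [List.zipIdx_cons, List.zipIdx_succ, List.filter_cons, List.filter_map]
  simp only [List.map_map, Function.comp_def]
  split_ifs with h h' h' <;> simp_all

-- sorted with id key of Nat lists: a 0 anywhere comes out in front
theorem pvSorted_mid_zero (X Y : List Nat) :
    PySem.List.sorted (X ++ 0 :: Y) (fun i => i) = 0 :: PySem.List.sorted (X ++ Y) (fun i => i) := by
  apply PySem.List.sorted_id_eq_of_perm_of_pairwise
  · exact ((PySem.List.sorted_perm (X ++ Y) _ false).cons 0).trans List.perm_middle.symm
  · exact List.pairwise_cons.2 ⟨fun y _ => Nat.zero_le y, by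
      simpa using PySem.List.sorted_pairwise (X ++ Y) (fun i => i)⟩

theorem pvSorted_cons_zero (Y : List Nat) :
    PySem.List.sorted (0 :: Y) (fun i => i) = 0 :: PySem.List.sorted Y (fun i => i) := by
  simpa using pvSorted_mid_zero [] Y

theorem pvSorted_map_succ (L : List Nat) :
    PySem.List.sorted (L.map (· + 1)) (fun i => i) = (PySem.List.sorted L (fun i => i)).map (· + 1) := by
  apply PySem.List.sorted_id_eq_of_perm_of_pairwise
  · exact (PySem.List.sorted_perm L _ false).map _
  · exact List.Pairwise.map _ (fun a b (h : a ≤ b) => by omega)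
      (by simpa using PySem.List.sorted_pairwise L (fun i => i))

theorem pvFilterMap_shift (s : List Int × List Int) (l : List (List Int × List Int)) (L : List Nat) :
    (L.map (· + 1)).filterMap (fun i => (s :: l)[i]?) = L.filterMap (fun i => l[i]?) := by
  rw [List.filterMap_map]; rfl

theorem pvGather_eq_keep (l : List (List Int × List Int)) :
    ∀ r n : Nat, pvGather l r n = pvKeep l r n := by
  induction l with
  | nil => intro r n; simp [pvGather, pvKeep]
  | cons s l ih =>
    intro r n
    unfold pvGather
    rw [pvIdx1_cons, pvIdx0_cons]
    by_cases h1 : pvLabelA s = 1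
    · have h0 : ¬ pvLabelA s = 0 := by rw [h1]; omega
      rw [if_pos h1, if_neg h0]
      cases r with
      | zero =>
          rw [List.take_zero, List.nil_append, ← List.map_take, pvSorted_map_succ,
            pvFilterMap_shift]
          have := ih 0 n
          unfold pvGather at this
          rw [List.take_zero, List.nil_append] at this
          rw [this]
          simp [pvKeep, h1]
      | succ r' =>
          rw [List.take_succ_cons, List.cons_append, ← List.map_take, ← List.map_take,
            ← List.map_append, pvSorted_cons_zero, pvSorted_map_succ, List.filterMap_cons]
          simp only [List.getElem?_cons_zero]
          rw [pvFilterMap_shift]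
          have := ih r' n
          unfold pvGather at this
          rw [this]
          simp [pvKeep, h1]
    · by_cases h0 : pvLabelA s = 0
      · rw [if_neg h1, if_pos h0]
        cases n with
        | zero =>
            rw [List.take_zero, List.append_nil, ← List.map_take, pvSorted_map_succ,
              pvFilterMap_shift]
            have := ih r 0
            unfold pvGather at this
            rw [List.take_zero, List.append_nil] at this
            rw [this]
            simp [pvKeep, h0]
        | succ n' =>
            rw [List.take_succ_cons, ← List.map_take, ← List.map_take, pvSorted_mid_zero,
              ← List.map_append, pvSorted_map_succ, List.filterMap_cons]
            simp only [List.getElem?_cons_zero]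
            rw [pvFilterMap_shift]
            have := ih r n'
            unfold pvGather at this
            rw [this]
            simp [pvKeep, h0]
      · rw [if_neg h1, if_neg h0, ← List.map_take, ← List.map_take, ← List.map_append,
          pvSorted_map_succ, pvFilterMap_shift]
        have := ih r n
        unfold pvGather at this
        rw [this]
        simp [pvKeep, h1, h0]

-- A's count over the filtered label list is the plain countP B uses
theorem pvCountA_eq (l : List (List Int × List Int)) :
    List.count 1 ((l.filter (fun s => pvLabelA s == 1)).map pvLabelA) =
      l.countP (fun s => pvLabelA s == 1) := by
  rw [List.count_eq_length.2, List.length_map, ← List.countP_eq_length_filter]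
  intro b hb
  simp only [List.mem_map, List.mem_filter] at hb
  obtain ⟨x, ⟨-, hx⟩, rfl⟩ := hb
  exact (eq_of_beq hx).symm

-- ===== VERDICT (by name: the statement is the Claim_ definition above) =====
theorem balance_dataset_spec : Claim_equal_balance_dataset := by
  intro dataset _ _
  unfold Spec_balance_dataset balance_dataset balance_dataset_alt
  simp only [pvCountA_eq]
  have hcle : dataset.countP (fun s => pvLabelA s == 1) ≤ dataset.length :=
    List.countP_le_length
  set c := dataset.countP (fun s => pvLabelA s == 1) with hc
  set m : Int := min (c : Int) ((dataset.length : Int) - (c : Int)) with hm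
  have hm0 : 0 ≤ m := by omega
  rw [PySem.List.slice_to _ hm0, PySem.List.slice_to _ hm0]
  rw [pvLoopA_eq_keep dataset m m [] hm0 hm0, List.nil_append]
  exact (pvGather_eq_keep dataset m.toNat m.toNat).symm
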